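-- pv_equiv track=rewrite | github.com/adamzwasserman/multicardz | apps/shared/old_core.py | partition_cards_into_grid
-- ===== SOURCE A (Python) =====
-- def partition_cards_into_grid(cards, row_tags, column_tags, toggle_mode):
--     """
--     Partition cards into grid cells based on row/column tag intersections.
--
--     IMPORTANT: toggle_mode (ANY/ALL) is already applied to determine which cards are "in play".
--     Grid partitioning logic: cards appear in cells where they have BOTH row tag AND column tag.
--     Cards that don't match any row tag go to "Other" row.
--     Cards that don't match any column tag go to "Other" column.
--
--     Returns grid_cells dict with keys like "row_tag_column_tag".
--     """
--     grid_cells = {}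
--
--     # Add "Other" to row and column tags for unmatched cards
--     all_row_tags = row_tags + ["Other"]
--     all_column_tags = column_tags + ["Other"]
--
--     # Initialize all possible grid cells (including Other combinations)
--     for row_tag in all_row_tags:
--         for column_tag in all_column_tags:
--             cell_key = f"{row_tag}_{column_tag}"
--             grid_cells[cell_key] = []
--
--     # Partition cards into appropriate cells
--     for card in cards:
--         card_tags = set(card.get("tags", []))
--
--         # Determine which row this card belongs to
--         card_row = "Other"  # Default to Other
--         for row_tag in row_tags:
--             if row_tag in card_tags:
--                 card_row = row_tag
--                 break  # Use first matching row tag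
--
--         # Determine which column this card belongs to
--         card_column = "Other"  # Default to Other
--         for column_tag in column_tags:
--             if column_tag in card_tags:
--                 card_column = column_tag
--                 break  # Use first matching column tag
--
--         # Place card in the intersection cell
--         cell_key = f"{card_row}_{card_column}"
--         grid_cells[cell_key].append(card)
--
--     return grid_cells
-- ===== SOURCE B (Python) =====
-- def partition_cards_into_grid(cards, row_tags, column_tags, toggle_mode):
--     """Same grid partition, but each card's row/column is found by scanning the
--     card's own tags against precomputed tag->index tables (earliest index wins),
--     instead of scanning row_tags/column_tags per card."""
--     row_index = {}
--     for i, t in enumerate(row_tags):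
--         row_index.setdefault(t, i)
--     column_index = {}
--     for i, t in enumerate(column_tags):
--         column_index.setdefault(t, i)
--
--     grid_cells = {}
--     for row_tag in row_tags + ["Other"]:
--         for column_tag in column_tags + ["Other"]:
--             grid_cells[f"{row_tag}_{column_tag}"] = []
--
--     def best(tags, index):
--         b = None
--         for t in tags:
--             i = index.get(t)
--             if i is not None and (b is None or i < b[0]):
--                 b = (i, t)
--         return b[1] if b is not None else "Other"
--
--     for card in cards:
--         tags = card.get("tags", [])
--         grid_cells[f"{best(tags, row_index)}_{best(tags, column_index)}"].append(card)
--
--     return grid_cells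
-- ===== Notes on version B (the rewrite author's own statement) =====
-- stated objective: alternative
-- what changed: Instead of scanning row_tags and column_tags per card for the first tag the card contains, B precomputes tag-to-first-index dictionaries once and, per card, scans only the card's own tags keeping the minimum stored index (min index = first match in list order); setdefault keeps the earliest index under duplicate tags.
import Mathlib
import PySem

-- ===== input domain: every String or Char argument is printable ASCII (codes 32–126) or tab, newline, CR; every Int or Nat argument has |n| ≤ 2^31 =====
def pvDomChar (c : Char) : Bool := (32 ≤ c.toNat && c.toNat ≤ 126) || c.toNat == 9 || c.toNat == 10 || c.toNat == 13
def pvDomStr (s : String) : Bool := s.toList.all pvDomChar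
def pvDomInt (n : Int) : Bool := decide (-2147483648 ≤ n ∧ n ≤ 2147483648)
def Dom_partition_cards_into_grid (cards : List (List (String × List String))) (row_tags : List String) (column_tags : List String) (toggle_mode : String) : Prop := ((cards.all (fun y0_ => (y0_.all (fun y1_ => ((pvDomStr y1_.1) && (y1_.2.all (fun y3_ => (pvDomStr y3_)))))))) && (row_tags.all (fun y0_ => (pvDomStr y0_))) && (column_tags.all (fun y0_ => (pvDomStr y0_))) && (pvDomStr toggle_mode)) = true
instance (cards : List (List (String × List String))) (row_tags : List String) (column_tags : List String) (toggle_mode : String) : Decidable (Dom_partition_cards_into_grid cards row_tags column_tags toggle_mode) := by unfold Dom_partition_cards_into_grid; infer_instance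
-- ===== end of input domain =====

-- B replaces A's per-card scan of row_tags/column_tags by tag→first-index tables and a
-- minimum-index scan over the card's own tags (objective: alternative algorithm, same value).

-- ===== PORT A =====
-- A's "for row_tag in row_tags: if row_tag in card_tags: card_row = row_tag; break" loop
def pcgPickA (tags_set : PySem.Set String) : List String → String
  | [] => "Other"
  | t :: rest => if PySem.Set.contains tags_set t then t else pcgPickA tags_set rest

-- grid_cells[cell_key].append(card) is ported as getD + insert: cell_key is always present
-- (card_row/card_column come from row_tags/column_tags + "Other", all initialized), and
-- Dict.insert on a present key overwrites in place, so this is Python's in-place append.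
def partition_cards_into_grid (cards : List (List (String × List String))) (row_tags : List String) (column_tags : List String) (toggle_mode : String) : List (String × List (List (String × List String))) :=
  let all_row_tags := row_tags ++ ["Other"]
  let all_column_tags := column_tags ++ ["Other"]
  let grid0 : PySem.Dict String (List (List (String × List String))) :=
    all_row_tags.foldl (fun g row_tag =>
      all_column_tags.foldl (fun g column_tag =>
        g.insert (row_tag ++ "_" ++ column_tag) []) g) PySem.Dict.empty
  let grid := cards.foldl (fun g card =>
    let card_tags := PySem.Set.ofList ((PySem.Dict.mk card).getD "tags" [])
    let card_row := pcgPickA card_tags row_tags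
    let card_column := pcgPickA card_tags column_tags
    let cell_key := card_row ++ "_" ++ card_column
    g.insert cell_key (g.getD cell_key [] ++ [card])) grid0
  grid.items

-- ===== PORT B =====
-- row_index / column_index: tag -> its first index (setdefault keeps the earliest)
def pcgIndexB (ts : List String) : PySem.Dict String Int :=
  (PySem.List.enumerate ts).foldl (fun d p => d.setdefault p.2 p.1) PySem.Dict.empty

-- one step of best's loop: keep the (index, tag) pair with the smallest index
def pcgStep (index : PySem.Dict String Int) (b : Option (Int × String)) (t : String) : Option (Int × String) :=
  match index.get? t with
  | some i =>
    match b with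
    | none => some (i, t)
    | some p => if i < p.1 then some (i, t) else b
  | none => b

def pcgBestB (tags : List String) (index : PySem.Dict String Int) : String :=
  match tags.foldl (pcgStep index) none with
  | some p => p.2
  | none => "Other"

def partition_cards_into_grid_alt (cards : List (List (String × List String))) (row_tags : List String) (column_tags : List String) (toggle_mode : String) : List (String × List (List (String × List String))) :=
  let row_index := pcgIndexB row_tags
  let column_index := pcgIndexB column_tags
  let grid0 : PySem.Dict String (List (List (String × List String))) :=
    (row_tags ++ ["Other"]).foldl (fun g row_tag =>
      (column_tags ++ ["Other"]).foldl (fun g column_tag =>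
        g.insert (row_tag ++ "_" ++ column_tag) []) g) PySem.Dict.empty
  let grid := cards.foldl (fun g card =>
    let tags := (PySem.Dict.mk card).getD "tags" []
    let cell_key := pcgBestB tags row_index ++ "_" ++ pcgBestB tags column_index
    g.insert cell_key (g.getD cell_key [] ++ [card])) grid0
  grid.items

-- ===== PRECONDITION & SPEC =====
def Spec_partition_cards_into_grid (cards : List (List (String × List String))) (row_tags : List String) (column_tags : List String) (toggle_mode : String) (out : List (String × List (List (String × List String)))) : Prop := out = partition_cards_into_grid_alt cards row_tags column_tags toggle_mode
instance (cards : List (List (String × List String))) (row_tags : List String) (column_tags : List String) (toggle_mode : String) (out : List (String × List (List (String × List String)))) : Decidable (Spec_partition_cards_into_grid cards row_tags column_tags toggle_mode out) := by unfold Spec_partition_cards_into_grid; infer_instance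

-- ===== CLAIM (what is proved, stated in full; the proofs are below) =====
def Claim_equal_partition_cards_into_grid : Prop := ∀ (cards : List (List (String × List String))) (row_tags : List String) (column_tags : List String) (toggle_mode : String), Dom_partition_cards_into_grid cards row_tags column_tags toggle_mode → Spec_partition_cards_into_grid cards row_tags column_tags toggle_mode (partition_cards_into_grid cards row_tags column_tags toggle_mode)

-- ===== LEMMAS AND PROOFS =====

@[simp] lemma pcgPickA_nil (s : PySem.Set String) : pcgPickA s [] = "Other" := rfl

lemma pcgPickA_cons (s : PySem.Set String) (t : String) (rest : List String) :
    pcgPickA s (t :: rest) = if PySem.Set.contains s t then t else pcgPickA s rest := rfl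

-- first index of t in ts, as pcgIndexB stores it
def pcgFirstIdx : List String → String → Option Int
  | [], _ => none
  | x :: xs, t => if x = t then some 0 else (pcgFirstIdx xs t).map (· + 1)

lemma pcgIdx_aux (ts : List String) : ∀ (s : Int) (d : PySem.Dict String Int) (t : String),
    ((PySem.List.enumerate ts s).foldl (fun d p => d.setdefault p.2 p.1) d).get? t
      = match d.get? t with
        | some v => some v
        | none => (pcgFirstIdx ts t).map (· + s) := by
  induction ts with
  | nil =>
    intro s d t
    simp only [PySem.List.enumerate_nil, List.foldl_nil, pcgFirstIdx, Option.map_none]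
    cases d.get? t <;> rfl
  | cons x xs ih =>
    intro s d t
    rw [PySem.List.enumerate_cons]
    simp only [List.foldl_cons, ih (s + 1)]
    by_cases hxt : x = t
    · subst hxt
      rw [PySem.Dict.get?_setdefault_self]
      simp only [pcgFirstIdx]
      cases d.get? x <;> simp
    · rw [PySem.Dict.get?_setdefault_of_ne d s (Ne.symm hxt)]
      simp only [pcgFirstIdx, if_neg hxt]
      cases d.get? t with
      | some v => rfl
      | none =>
        cases pcgFirstIdx xs t with
        | none => rfl
        | some j => simp only [Option.map_some]; congr 1; omega

lemma pcgIdx_spec (ts : List String) (t : String) :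
    (pcgIndexB ts).get? t = pcgFirstIdx ts t := by
  unfold pcgIndexB
  rw [pcgIdx_aux ts 0 PySem.Dict.empty t]
  rw [PySem.Dict.get?_empty]
  cases pcgFirstIdx ts t <;> simp

lemma pcgFirstIdx_nonneg (ts : List String) (t : String) (i : Int)
    (h : pcgFirstIdx ts t = some i) : 0 ≤ i := by
  induction ts generalizing i with
  | nil => simp [pcgFirstIdx] at h
  | cons x xs ih =>
    simp only [pcgFirstIdx] at h
    by_cases hx : x = t
    · rw [if_pos hx] at h; injection h with h; omega
    · rw [if_neg hx] at h
      cases hfx : pcgFirstIdx xs t with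
      | none => rw [hfx] at h; simp at h
      | some j =>
        rw [hfx] at h
        simp only [Option.map_some, Option.some.injEq] at h
        have := ih j hfx
        omega

lemma pcgFirstIdx_zero (x : String) (xs : List String) (t : String)
    (h : pcgFirstIdx (x :: xs) t = some 0) : t = x := by
  by_cases hx : x = t
  · exact hx.symm
  · exfalso
    simp only [pcgFirstIdx, if_neg hx] at h
    cases hfx : pcgFirstIdx xs t with
    | none => rw [hfx] at h; simp at h
    | some j =>
      rw [hfx] at h
      simp only [Option.map_some, Option.some.injEq] at h
      have := pcgFirstIdx_nonneg xs t j hfx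
      omega

lemma pcgFold_none (index : PySem.Dict String Int) :
    ∀ (tags : List String), (∀ t ∈ tags, index.get? t = none) →
      ∀ b, tags.foldl (pcgStep index) b = b := by
  intro tags
  induction tags with
  | nil => intro _ b; rfl
  | cons t rest ih =>
    intro h b
    have ht := h t (List.mem_cons_self ..)
    simp only [List.foldl_cons, pcgStep, ht]
    exact ih (fun t' h' => h t' (List.mem_cons_of_mem _ h')) b

lemma pcgFold_shift (index index' : PySem.Dict String Int) :
    ∀ (tags : List String), (∀ t ∈ tags, index'.get? t = (index.get? t).map (· + 1)) →
      ∀ b, tags.foldl (pcgStep index') (b.map (fun p => (p.1 + 1, p.2)))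
        = (tags.foldl (pcgStep index) b).map (fun p => (p.1 + 1, p.2)) := by
  intro tags
  induction tags with
  | nil => intro _ b; rfl
  | cons t rest ih =>
    intro h b
    have ht := h t (List.mem_cons_self ..)
    have hrest : ∀ t' ∈ rest, index'.get? t' = (index.get? t').map (· + 1) :=
      fun t' h' => h t' (List.mem_cons_of_mem _ h')
    simp only [List.foldl_cons]
    have hstep : pcgStep index' (b.map (fun p => (p.1 + 1, p.2))) t
        = (pcgStep index b t).map (fun p => (p.1 + 1, p.2)) := by
      cases hg : index.get? t with
      | none => rw [hg] at ht; simp only [pcgStep, ht, hg]; rfl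
      | some i =>
        rw [hg] at ht
        simp only [pcgStep, ht, hg, Option.map_some]
        cases b with
        | none => rfl
        | some p =>
          simp only [Option.map_some]
          by_cases hlt : i < p.1
          · rw [if_pos hlt, if_pos (by omega)]; rfl
          · rw [if_neg hlt, if_neg (by omega)]; rfl
    rw [hstep]
    exact ih hrest (pcgStep index b t)

lemma pcgFold_min0 (index : PySem.Dict String Int) (r : String)
    (h0 : index.get? r = some 0)
    (hnn : ∀ t i, index.get? t = some i → 0 ≤ i)
    (hz : ∀ t, index.get? t = some 0 → t = r) :
    ∀ (tags : List String) (b : Option (Int × String)),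
      (b = none ∨ ∃ p, b = some p ∧ index.get? p.2 = some p.1) →
      (r ∈ tags ∨ b = some (0, r)) →
      tags.foldl (pcgStep index) b = some (0, r) := by
  intro tags
  induction tags with
  | nil =>
    intro b _ hmem
    rcases hmem with hmem | hmem
    · exact absurd hmem (List.not_mem_nil)
    · simpa using hmem
  | cons t rest ih =>
    intro b hinv hmem
    simp only [List.foldl_cons]
    have hinv' : pcgStep index b t = none ∨
        ∃ p, pcgStep index b t = some p ∧ index.get? p.2 = some p.1 := by
      cases hg : index.get? t with
      | none => simpa [pcgStep, hg] using hinv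
      | some i =>
        cases b with
        | none => exact Or.inr ⟨(i, t), by simp [pcgStep, hg], by simpa using hg⟩
        | some p =>
          by_cases hlt : i < p.1
          · exact Or.inr ⟨(i, t), by simp [pcgStep, hg, if_pos hlt], by simpa using hg⟩
          · rcases hinv with hinv | ⟨q, hq, hq2⟩
            · exact absurd hinv (by simp)
            · exact Or.inr ⟨q, by simp only [pcgStep, hg, if_neg hlt]; exact hq, hq2⟩
    apply ih _ hinv'
    rcases hmem with hmem | hmem
    · rcases List.mem_cons.mp hmem with rfl | hmemr
      · -- the head tag is r itself
        right
        cases b with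
        | none => simp [pcgStep, h0]
        | some p =>
          rcases hinv with hinv | ⟨q, hq, hq2⟩
          · exact absurd hinv (by simp)
          · injection hq with hq; subst hq
            have hp1 : (0:Int) ≤ p.1 := hnn p.2 p.1 hq2
            by_cases hlt : (0:Int) < p.1
            · simp [pcgStep, h0, if_pos hlt]
            · have hp0 : p.1 = 0 := by omega
              have hpr : p.2 = r := hz p.2 (hp0 ▸ hq2)
              simp only [pcgStep, h0, if_neg hlt]
              rw [show p = (0, r) from Prod.ext hp0 hpr]
      · exact Or.inl hmemr
    · right
      rw [hmem]
      cases hg : index.get? t with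
      | none => simp [pcgStep, hg]
      | some i =>
        have : ¬ i < (0:Int) := by have := hnn t i hg; omega
        simp [pcgStep, hg, if_neg this]

@[simp] lemma pcgSel (tags : List String) (rts : List String) :
    pcgBestB tags (pcgIndexB rts) = pcgPickA (PySem.Set.ofList tags) rts := by
  induction rts with
  | nil =>
    unfold pcgBestB
    rw [pcgFold_none _ _ (fun t _ => by rw [pcgIdx_spec]; rfl)]
    simp
  | cons r rest ih =>
    have hcontains : PySem.Set.contains (PySem.Set.ofList tags) r = true ↔ r ∈ tags := by
      rw [PySem.Set.contains_iff, PySem.Set.mem_ofList]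
    by_cases hr : r ∈ tags
    · rw [pcgPickA_cons, if_pos (hcontains.mpr hr)]
      unfold pcgBestB
      rw [pcgFold_min0 (pcgIndexB (r :: rest)) r
        (by rw [pcgIdx_spec]; simp [pcgFirstIdx])
        (fun t i h => pcgFirstIdx_nonneg _ _ _ (by rwa [pcgIdx_spec] at h))
        (fun t h => pcgFirstIdx_zero r rest t (by rwa [pcgIdx_spec] at h))
        tags none (Or.inl rfl) (Or.inl hr)]
    · rw [pcgPickA_cons, if_neg (by rw [hcontains]; exact hr), ← ih]
      unfold pcgBestB
      have hsh : ∀ t ∈ tags,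
          (pcgIndexB (r :: rest)).get? t = ((pcgIndexB rest).get? t).map (· + 1) := by
        intro t htm
        rw [pcgIdx_spec, pcgIdx_spec]
        have hne : r ≠ t := fun he => hr (he ▸ htm)
        simp [pcgFirstIdx, if_neg hne]
      have hsf := pcgFold_shift (pcgIndexB rest) (pcgIndexB (r :: rest)) tags hsh none
      simp only [Option.map_none] at hsf
      rw [hsf]
      cases tags.foldl (pcgStep (pcgIndexB rest)) none <;> rfl

-- ===== VERDICT (by name: the statement is the Claim_ definition above) =====
theorem partition_cards_into_grid_spec : Claim_equal_partition_cards_into_grid := by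
  intro cards row_tags column_tags toggle_mode _
  unfold Spec_partition_cards_into_grid
  unfold partition_cards_into_grid partition_cards_into_grid_alt
  simp only [pcgSel]
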